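-- pv_equiv track=rewrite | github.com/AlaminSarkerFRII/bangla-entity-linking | ner/silver_ner.py | bio_tag
-- ===== SOURCE A (Python) =====
-- def bio_tag(tokens, mention, label="ENT"):
--     """
--     Convert a single entity mention into BIO tags
--     """
--     tags = ["O"] * len(tokens)
--
--     mention_tokens = mention.split()
--     m_len = len(mention_tokens)
--
--     for i in range(len(tokens) - m_len + 1):
--         if tokens[i:i + m_len] == mention_tokens:
--             tags[i] = f"B-{label}"
--             for j in range(1, m_len):
--                 tags[i + j] = f"I-{label}"
--             return tags
--
--     return None
-- ===== SOURCE B (Python) =====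
-- def _step(pat, q, t):
--     # longest p such that pat[:p] is a suffix of pat[:q] + [t]
--     for p in range(q + 1, 0, -1):
--         if pat[p - 1] == t and (p == q + 1 or pat[q - p + 1:q] == pat[:p - 1]):
--             return p
--     return 0
--
--
-- def bio_tag(tokens, mention, label="ENT"):
--     """
--     Convert a single entity mention into BIO tags.
--
--     Morris-Pratt-style matching automaton: scan the tokens once keeping a
--     state q = length of the longest prefix of the mention that is a suffix
--     of the tokens read so far (the automaton transition _step is computed
--     on the fly from the pattern alone).  The first time q reaches the full
--     mention length a match ends at the current position and the tag list is
--     emitted by concatenation; token windows are never sliced or compared.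
--     A whitespace-only mention has no occurrence, so it yields None.
--     """
--     pat = mention.split()
--     k = len(pat)
--     if k == 0:
--         return None
--     n = len(tokens)
--     q = 0
--     for j, tok in enumerate(tokens):
--         q = _step(pat, q, tok)
--         if q == k:
--             i = j + 1 - k
--             return (["O"] * i
--                     + ["B-" + label]
--                     + ["I-" + label] * (k - 1)
--                     + ["O"] * (n - j - 1))
--     return None
-- ===== Notes on version B (the rewrite author's own statement) =====
-- stated objective: alternative
-- what changed: Replaces A's sliding-window scan (slice tokens[i:i+m] at every start position, mutate a pre-allocated tag array) by a Morris-Pratt-style matching automaton: one pass over the tokens maintaining q = length of the longest mention prefix that is a suffix of the tokens read so far, with the transition computed on the fly from the pattern alone; the tag list is emitted by concatenation when q first reaches the mention length. On a whitespace-only mention B returns None instead of A's spurious B- tag (D_).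
-- intended difference: On a whitespace-only mention (mention.split() == []) with non-empty tokens, A returns a list tagging the first token B-label and everything else O; B returns None, the intended value, since an empty mention occurs nowhere. — e.g. on bio_tag(["dhaka"], " ", "ENT"): A returns some ["B-ENT"], B returns none
import Mathlib
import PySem

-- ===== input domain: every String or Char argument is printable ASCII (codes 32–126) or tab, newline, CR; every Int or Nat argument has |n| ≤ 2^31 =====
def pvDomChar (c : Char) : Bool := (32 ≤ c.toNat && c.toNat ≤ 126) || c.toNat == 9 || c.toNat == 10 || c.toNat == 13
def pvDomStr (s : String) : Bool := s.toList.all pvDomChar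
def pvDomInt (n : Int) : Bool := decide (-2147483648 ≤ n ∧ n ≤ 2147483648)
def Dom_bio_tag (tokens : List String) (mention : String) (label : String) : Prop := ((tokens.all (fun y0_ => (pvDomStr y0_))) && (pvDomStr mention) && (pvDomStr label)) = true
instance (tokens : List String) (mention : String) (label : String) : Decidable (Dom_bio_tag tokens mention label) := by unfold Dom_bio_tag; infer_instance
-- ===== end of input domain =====

-- B replaces A's sliding-window scan (slice tokens[i:i+m] at every start, mutate a pre-allocated
-- tag array) by a Morris-Pratt-style matching automaton: one pass over the tokens maintaining the
-- length of the longest mention prefix that is a suffix of the tokens read so far; B returns None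
-- for whitespace-only mentions where A tags the first token (D_).


-- ===== PORT A =====
-- the 'for i in range(len(tokens) - m_len + 1): …' loop with its early return
def bioLoopA (tokens mt : List String) (mLen : Nat) (label : String) (tags : List String) : List Int → Option (List String)
  | [] => none
  | i :: is =>
      if PySem.List.slice tokens (some i) (some (i + (mLen : Int))) = mt then
        -- tags[i] = "B-{label}"; for j in range(1, m_len): tags[i+j] = "I-{label}"
        some ((PySem.List.pyRange 1 (mLen : Int) 1).foldl
                (fun t j => PySem.List.pySetD t (i + j) ("I-" ++ label))
                (PySem.List.pySetD tags i ("B-" ++ label)))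
      else bioLoopA tokens mt mLen label tags is

def bio_tag (tokens : List String) (mention : String) (label : String) : Option (List String) :=
  let tags := PySem.List.pyRepeat ["O"] (tokens.length : Int)
  let mentionTokens := PySem.Str.split₀ mention
  let mLen := mentionTokens.length
  bioLoopA tokens mentionTokens mLen label tags
    (PySem.List.pyRange 0 ((tokens.length : Int) - (mLen : Int) + 1) 1)

-- ===== PORT B =====
-- _step's 'for p in range(q + 1, 0, -1)' countdown (Lean p is Python's p - 1)
def bioStep (pat : List String) (q : Nat) (t : String) : Nat → Nat
  | 0 => 0
  | p + 1 =>
      if PySem.List.pyGet? pat (p : Int) = some t ∧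
         (p + 1 = q + 1 ∨
          PySem.List.slice pat (some ((q : Int) - ((p : Int) + 1) + 1)) (some (q : Int))
            = PySem.List.slice pat none (some (p : Int))) then
        p + 1
      else bioStep pat q t p

-- the 'for j, tok in enumerate(tokens)' automaton scan carrying state q
def bioScanB (pat : List String) (k : Nat) (bTag iTag : String) (n : Nat) :
    List String → Nat → Nat → Option (List String)
  | [], _, _ => none
  | tok :: rest, j, q =>
      if bioStep pat q tok (q + 1) = k then
        some (List.replicate (j + 1 - k) "O" ++
              bTag :: (List.replicate (k - 1) iTag ++ List.replicate (n - j - 1) "O"))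
      else bioScanB pat k bTag iTag n rest (j + 1) (bioStep pat q tok (q + 1))

def bio_tag_alt (tokens : List String) (mention : String) (label : String) : Option (List String) :=
  match PySem.Str.split₀ mention with
  | [] => none
  | first :: restM =>
      bioScanB (first :: restM) (first :: restM).length ("B-" ++ label) ("I-" ++ label)
        tokens.length tokens 0 0

-- ===== PRECONDITION & SPEC =====
-- Pre_ excludes only the inputs where A raises IndexError: empty tokens with a whitespace-only
-- mention (mention.split() == []), where A writes tags[0] into an empty list.
def Pre_bio_tag (tokens : List String) (mention : String) (label : String) : Prop :=
  tokens ≠ [] ∨ PySem.Str.split₀ mention ≠ []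
instance (tokens : List String) (mention : String) (label : String) : Decidable (Pre_bio_tag tokens mention label) := by unfold Pre_bio_tag; infer_instance
def pvWitness_bio_tag : List String × String × String := (["New", "York", "City"], "York City", "LOC")

-- On a whitespace-only mention (mention.split() == []) with non-empty tokens, A returns a list
-- tagging the first token B-label and everything else O; B returns none, the intended value,
-- since an empty mention occurs nowhere.
def D_bio_tag (tokens : List String) (mention : String) (label : String) : Prop :=
  tokens ≠ [] ∧ PySem.Str.split₀ mention = []
instance (tokens : List String) (mention : String) (label : String) : Decidable (D_bio_tag tokens mention label) := by unfold D_bio_tag; infer_instance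

def Spec_bio_tag (tokens : List String) (mention : String) (label : String) (out : Option (List String)) : Prop := ¬ D_bio_tag tokens mention label → out = bio_tag_alt tokens mention label
instance (tokens : List String) (mention : String) (label : String) (out : Option (List String)) : Decidable (Spec_bio_tag tokens mention label out) := by unfold Spec_bio_tag; infer_instance

def pvDiffWitness_bio_tag : List String × String × String := (["dhaka"], " ", "ENT")
def pvDiffWitnessOut_bio_tag : (Option (List String)) × (Option (List String)) := (some ["B-ENT"], none)

-- ===== CLAIM (what is proved, stated in full; the proofs are below) =====
def Claim_unchanged_bio_tag : Prop := ∀ (tokens : List String) (mention : String) (label : String), Dom_bio_tag tokens mention label → Pre_bio_tag tokens mention label → Spec_bio_tag tokens mention label (bio_tag tokens mention label)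
def Claim_changed_bio_tag : Prop := Dom_bio_tag (pvDiffWitness_bio_tag.1) (pvDiffWitness_bio_tag.2.1) (pvDiffWitness_bio_tag.2.2) ∧ Pre_bio_tag (pvDiffWitness_bio_tag.1) (pvDiffWitness_bio_tag.2.1) (pvDiffWitness_bio_tag.2.2) ∧ D_bio_tag (pvDiffWitness_bio_tag.1) (pvDiffWitness_bio_tag.2.1) (pvDiffWitness_bio_tag.2.2) ∧ bio_tag (pvDiffWitness_bio_tag.1) (pvDiffWitness_bio_tag.2.1) (pvDiffWitness_bio_tag.2.2) = pvDiffWitnessOut_bio_tag.1 ∧ bio_tag_alt (pvDiffWitness_bio_tag.1) (pvDiffWitness_bio_tag.2.1) (pvDiffWitness_bio_tag.2.2) = pvDiffWitnessOut_bio_tag.2 ∧ pvDiffWitnessOut_bio_tag.1 ≠ pvDiffWitnessOut_bio_tag.2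
def Claim_exact_bio_tag : Prop := ∀ (tokens : List String) (mention : String) (label : String), Dom_bio_tag tokens mention label → Pre_bio_tag tokens mention label → D_bio_tag tokens mention label → bio_tag tokens mention label ≠ bio_tag_alt tokens mention label

-- ===== LEMMAS AND PROOFS =====

-- reference objects the two ports are related through
def isMatch (tokens pat : List String) (i : Nat) : Prop :=
  (tokens.drop i).take pat.length = pat

-- first-match search (reference only, used to state both characterizations)
def fmAux (tokens pat : List String) : Nat → Nat → Option Nat
  | 0, _ => none
  | d + 1, i =>
      if (tokens.drop i).take pat.length = pat then some i else fmAux tokens pat d (i + 1)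

-- the BIO tag list for a match starting at i
def mOut (n k : Nat) (bT iT : String) (i : Nat) : List String :=
  List.replicate i "O" ++ bT :: (List.replicate (k - 1) iT ++ List.replicate (n - i - k) "O")

-- the enumerate-scan reference: first window match by start position
def refScan (k : Nat) (first : String) (restM : List String) (bTag iTag : String) (n : Nat) :
    List String → Nat → Option (List String)
  | [], _ => none
  | tok :: rest, i =>
      if tok = first ∧ rest.take (k - 1) = restM then
        some (List.replicate i "O" ++ bTag :: (List.replicate (k - 1) iTag ++ List.replicate (n - i - k) "O"))
      else refScan k first restM bTag iTag n rest (i + 1)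

lemma suffix_concat_iff {α : Type} (a b : List α) (x y : α) :
    a ++ [x] <:+ b ++ [y] ↔ x = y ∧ a <:+ b := by
  rw [← List.reverse_prefix]; simp [List.cons_prefix_cons, ← List.reverse_prefix]

lemma fm_none (tokens pat : List String) (h : ∀ i', ¬ isMatch tokens pat i') :
    ∀ d i, fmAux tokens pat d i = none := by
  simp only [isMatch] at h
  intro d
  induction d with
  | zero => intro i; rfl
  | succ d ih =>
      intro i
      rw [fmAux, if_neg (h i), ih]

lemma fm_some (tokens pat : List String) (i0 : Nat) (hm : isMatch tokens pat i0)
    (hf : ∀ i', i' < i0 → ¬ isMatch tokens pat i') :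
    ∀ d i, i ≤ i0 → i0 < i + d → fmAux tokens pat d i = some i0 := by
  intro d
  induction d with
  | zero => intro i h1 h2; omega
  | succ d ih =>
      intro i h1 h2
      rw [fmAux]
      by_cases hi : i = i0
      · rw [if_pos (by subst hi; exact hm), hi]
      · rw [if_neg (by have := hf i (by omega); simpa [isMatch] using this)]
        exact ih (i + 1) (by omega) (by omega)

-- a match forces room for the pattern
lemma isMatch_bound (tokens pat : List String) (i : Nat) (hk : pat ≠ [])
    (h : isMatch tokens pat i) : i + pat.length ≤ tokens.length := by
  unfold isMatch at h
  have := congrArg List.length h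
  simp [List.length_take, List.length_drop] at this
  have hk' : 0 < pat.length := List.length_pos_of_ne_nil hk
  omega

-- pat is a suffix of tokens[:e] exactly when a window match ends at e
lemma suffix_take_iff_match (tokens pat : List String) (e : Nat)
    (he : e ≤ tokens.length) (hk : pat.length ≤ e) :
    pat <:+ tokens.take e ↔ isMatch tokens pat (e - pat.length) := by
  unfold isMatch
  rw [List.suffix_iff_eq_drop, List.length_take, Nat.min_eq_left he, List.drop_take,
    (by omega : e - (e - pat.length) = pat.length), eq_comm]

-- ### characterization of the enumerate-scan reference ###
lemma ref_correct (tokens : List String) (first : String) (restM : List String) (bT iT : String) :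
    ∀ (rest : List String) (i : Nat), tokens.drop i = rest →
      (∀ i', i' < i → ¬ isMatch tokens (first :: restM) i') →
      refScan (restM.length + 1) first restM bT iT tokens.length rest i
        = (fmAux tokens (first :: restM) tokens.length 0).map
            (mOut tokens.length (restM.length + 1) bT iT) := by
  intro rest
  induction rest with
  | nil =>
      intro i hrest hf
      have hn : tokens.length ≤ i := List.drop_eq_nil_iff.mp hrest
      rw [fm_none tokens (first :: restM) ?_ tokens.length 0]
      · rfl
      · intro i' hM
        by_cases h : i' < i
        · exact hf i' h hM
        · unfold isMatch at hM
          rw [List.drop_eq_nil_of_le (by omega), List.take_nil] at hM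
          exact List.cons_ne_nil _ _ hM.symm
  | cons tok rest ih =>
      intro i hrest hf
      have hi : i < tokens.length := by
        by_contra h
        rw [List.drop_eq_nil_of_le (by omega)] at hrest
        exact List.cons_ne_nil _ _ hrest.symm
      have hdrop := List.drop_eq_getElem_cons hi
      rw [hrest] at hdrop
      obtain ⟨htok, hrest'⟩ := List.cons_eq_cons.mp hdrop
      rw [refScan]
      simp only [Nat.add_sub_cancel]
      have hM : isMatch tokens (first :: restM) i ↔ (tok = first ∧ rest.take restM.length = restM) := by
        unfold isMatch
        rw [hrest]
        simp [List.take_succ_cons]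
      by_cases hc : tok = first ∧ rest.take restM.length = restM
      · rw [if_pos hc]
        have hMi : isMatch tokens (first :: restM) i := hM.mpr hc
        have hb := isMatch_bound tokens (first :: restM) i (List.cons_ne_nil _ _) hMi
        simp only [List.length_cons] at hb
        rw [fm_some tokens (first :: restM) i hMi hf tokens.length 0 (by omega) (by omega)]
        rfl
      · rw [if_neg hc]
        exact ih (i + 1) hrest'.symm (by
          intro i' hi' hMi
          rcases Nat.lt_or_ge i' i with h | h
          · exact hf i' h hMi
          · exact hc (hM.mp (by rwa [(by omega : i' = i)] at hMi)))

-- ### the automaton transition computes the longest extendable prefix ###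
lemma cond_iff (pat : List String) (q p : Nat) (t : String) (hq : q < pat.length) (hpq : p ≤ q) :
    (PySem.List.pyGet? pat (p : Int) = some t ∧
      (p + 1 = q + 1 ∨
       PySem.List.slice pat (some ((q : Int) - ((p : Int) + 1) + 1)) (some (q : Int))
         = PySem.List.slice pat none (some (p : Int))))
    ↔ pat.take (p + 1) <:+ pat.take q ++ [t] := by
  have hp : p < pat.length := lt_of_le_of_lt hpq hq
  have hstart : (q : Int) - ((p : Int) + 1) + 1 = ((q - p : Nat) : Int) := by
    rw [Nat.cast_sub hpq]; ring
  rw [PySem.List.pyGet?_natCast, List.getElem?_eq_getElem hp, hstart,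
    PySem.List.slice_natCast, PySem.List.slice_to_natCast,
    (by omega : q - (q - p) = p), List.take_add_one, List.getElem?_eq_getElem hp]
  simp only [Option.toList_some]
  rw [suffix_concat_iff]
  have hsfx : pat.take p <:+ pat.take q ↔ (pat.drop (q - p)).take p = pat.take p := by
    rw [List.suffix_iff_eq_drop, List.length_take, List.length_take,
      Nat.min_eq_left hp.le, Nat.min_eq_left hq.le, List.drop_take,
      (by omega : q - (q - p) = p), eq_comm]
  constructor
  · rintro ⟨h1, h2⟩
    refine ⟨by simpa using h1, ?_⟩
    rcases h2 with h | h
    · rw [(by omega : p = q)]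
    · exact hsfx.mpr h
  · rintro ⟨h1, h2⟩
    exact ⟨by simpa using h1, Or.inr (hsfx.mp h2)⟩

lemma step_loop (pat : List String) (q : Nat) (t : String) (hq : q < pat.length) :
    ∀ m, m ≤ q + 1 →
      bioStep pat q t m ≤ m ∧
      pat.take (bioStep pat q t m) <:+ pat.take q ++ [t] ∧
      ∀ p, p ≤ m → pat.take p <:+ pat.take q ++ [t] → p ≤ bioStep pat q t m := by
  intro m
  induction m with
  | zero =>
      intro _
      refine ⟨le_refl 0, by simp [bioStep], ?_⟩
      intro p hp _; omega
  | succ m ih =>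
      intro hm
      rw [bioStep]
      by_cases hc : PySem.List.pyGet? pat (m : Int) = some t ∧
          (m + 1 = q + 1 ∨
           PySem.List.slice pat (some ((q : Int) - ((m : Int) + 1) + 1)) (some (q : Int))
             = PySem.List.slice pat none (some (m : Int)))
      · rw [if_pos hc]
        refine ⟨le_refl _, (cond_iff pat q m t hq (by omega)).mp hc, ?_⟩
        intro p hp _; omega
      · rw [if_neg hc]
        obtain ⟨h1, h2, h3⟩ := ih (by omega)
        refine ⟨by omega, h2, ?_⟩
        intro p hp hs
        rcases Nat.lt_or_ge p (m + 1) with h | h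
        · exact h3 p (by omega) hs
        · exfalso
          have hpm : p = m + 1 := by omega
          exact hc ((cond_iff pat q m t hq (by omega)).mpr (hpm ▸ hs))

-- ### characterization of the automaton scan ###
lemma auto_correct (tokens pat : List String) (bT iT : String) (hk : pat ≠ []) :
    ∀ (rest : List String) (j q : Nat), tokens.drop j = rest → q < pat.length →
      pat.take q <:+ tokens.take j →
      (∀ p, p ≤ pat.length → pat.take p <:+ tokens.take j → p ≤ q) →
      (∀ i, i + pat.length ≤ j → ¬ isMatch tokens pat i) →
      bioScanB pat pat.length bT iT tokens.length rest j q
        = (fmAux tokens pat tokens.length 0).map (mOut tokens.length pat.length bT iT) := by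
  have hk0 : 0 < pat.length := List.length_pos_of_ne_nil hk
  intro rest
  induction rest with
  | nil =>
      intro j q hrest _ _ _ hend
      have hn : tokens.length ≤ j := List.drop_eq_nil_iff.mp hrest
      rw [fm_none tokens pat ?_ tokens.length 0]
      · rfl
      · intro i hM
        exact hend i (le_trans (isMatch_bound tokens pat i hk hM) hn) hM
  | cons tok rest ih =>
      intro j q hrest hqlt hsfx hmax hend
      have hj : j < tokens.length := by
        by_contra h
        rw [List.drop_eq_nil_of_le (by omega)] at hrest
        exact List.cons_ne_nil _ _ hrest.symm
      have hdrop := List.drop_eq_getElem_cons hj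
      rw [hrest] at hdrop
      obtain ⟨htok, hrest'⟩ := List.cons_eq_cons.mp hdrop
      have htake1 : tokens.take (j + 1) = tokens.take j ++ [tokens[j]] := by
        rw [List.take_add_one, List.getElem?_eq_getElem hj]
        rfl
      obtain ⟨hstep_le, hstep_sfx, hstep_max⟩ := step_loop pat q tok hqlt (q + 1) (le_refl _)
      have hS1 : pat.take (bioStep pat q tok (q + 1)) <:+ tokens.take (j + 1) := by
        rw [htake1, ← htok]
        exact hstep_sfx.trans ((suffix_concat_iff _ _ _ _).mpr ⟨rfl, hsfx⟩)
      have hmax' : ∀ p, p ≤ pat.length → pat.take p <:+ tokens.take (j + 1) →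
          p ≤ bioStep pat q tok (q + 1) := by
        intro p hpk hs
        match p with
        | 0 => exact Nat.zero_le _
        | p' + 1 =>
          have hp' : p' < pat.length := by omega
          rw [List.take_add_one, List.getElem?_eq_getElem hp', htake1] at hs
          simp only [Option.toList_some] at hs
          rw [suffix_concat_iff] at hs
          obtain ⟨heq, hs'⟩ := hs
          have hpq : p' ≤ q := hmax p' (by omega) hs'
          apply hstep_max (p' + 1) (by omega)
          rw [List.take_add_one, List.getElem?_eq_getElem hp']
          simp only [Option.toList_some]
          rw [suffix_concat_iff]
          refine ⟨heq.trans htok.symm, ?_⟩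
          exact List.suffix_of_suffix_length_le hs' hsfx (by
            rw [List.length_take, List.length_take, Nat.min_eq_left hp'.le,
              Nat.min_eq_left hqlt.le]
            exact hpq)
      rw [bioScanB]
      by_cases hfin : bioStep pat q tok (q + 1) = pat.length
      · rw [if_pos hfin]
        have hsp : pat <:+ tokens.take (j + 1) := by
          rw [hfin, List.take_length] at hS1
          exact hS1
        have hkle : pat.length ≤ j + 1 := by
          have := hsp.length_le
          rw [List.length_take, Nat.min_eq_left (by omega)] at this
          exact this
        have hMi : isMatch tokens pat (j + 1 - pat.length) :=
          (suffix_take_iff_match tokens pat (j + 1) (by omega) hkle).mp hsp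
        have hfirst : ∀ i', i' < j + 1 - pat.length → ¬ isMatch tokens pat i' := by
          intro i' hi'
          exact hend i' (by omega)
        rw [fm_some tokens pat _ hMi hfirst tokens.length 0 (by omega) (by
          have := isMatch_bound tokens pat _ hk hMi
          omega)]
        simp only [Option.map_some, mOut,
          (by omega : tokens.length - (j + 1 - pat.length) - pat.length = tokens.length - j - 1)]
      · rw [if_neg hfin]
        refine ih (j + 1) (bioStep pat q tok (q + 1)) hrest'.symm (by omega) hS1 hmax' ?_
        intro i hik hM
        rcases Nat.lt_or_ge (i + pat.length) (j + 1) with h | h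
        · exact hend i (by omega) hM
        · have hie : i = j + 1 - pat.length := by omega
          have hsp : pat <:+ tokens.take (j + 1) := by
            refine (suffix_take_iff_match tokens pat (j + 1) ?_ (by omega)).mpr ?_
            · have := isMatch_bound tokens pat i hk hM
              omega
            · rwa [← hie]
          have := hmax' pat.length (le_refl _) (by rwa [List.take_length])
          omega

-- ===== A-side machinery (unchanged window-scan characterization) =====

-- setting one cell of an all-"O" array splits it into replicate pieces
lemma set_repl (n i : Nat) (a v : String) (h : i < n) :
    (List.replicate n a).set i v = List.replicate i a ++ v :: List.replicate (n - i - 1) a := by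
  rw [List.set_eq_take_append_cons_drop, if_pos (by simpa using h)]
  simp [List.take_replicate, List.drop_replicate, Nat.min_eq_left h.le, Nat.sub_sub]

-- a fold of writes at consecutive positions starting right after a fixed prefix
lemma consec (iv : String) : ∀ (c : Nat) (F : List String) (r : Nat), c ≤ r →
    (PySem.List.pyRange ((F.length : Nat) : Int) ((F.length : Int) + (c : Int)) 1).foldl
        (fun t x => PySem.List.pySetD t x iv) (F ++ List.replicate r "O")
      = F ++ (List.replicate c iv ++ List.replicate (r - c) "O") := by
  intro c
  induction c with
  | zero => intro F r _; simp
  | succ c ih =>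
      intro F r hcr
      rw [PySem.List.pyRange_one_cons (by omega : (F.length : Int) < F.length + (c+1 : Nat))]
      simp only [List.foldl_cons, PySem.List.pySetD_natCast]
      have hr : r = (r - 1) + 1 := by omega
      have hstep : (F ++ List.replicate r "O").set F.length iv
          = (F ++ [iv]) ++ List.replicate (r - 1) "O" := by
        rw [List.set_append_right _ _ (le_refl _), Nat.sub_self, hr, List.replicate_succ,
          List.set_cons_zero]
        simp
      rw [hstep]
      have hrange : PySem.List.pyRange ((F.length : Int) + 1) ((F.length : Int) + ((c+1 : Nat) : Int)) 1
          = PySem.List.pyRange (((F ++ [iv]).length : Nat) : Int) (((F ++ [iv]).length : Int) + (c : Int)) 1 := by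
        congr 1 <;> simp <;> push_cast <;> ring
      rw [hrange, ih (F ++ [iv]) (r - 1) (by omega)]
      simp [List.replicate_succ, Nat.sub_sub]
      omega

-- A's inner write loop on the all-"O" array produces the concatenated tag list
lemma bio_writeLoop_eq (n i k : Nat) (bv iv : String) (hk : 1 ≤ k) (hik : i + k ≤ n) :
    (PySem.List.pyRange 1 (k : Int) 1).foldl
        (fun t j => PySem.List.pySetD t ((i : Int) + j) iv)
        (PySem.List.pySetD (List.replicate n "O") (i : Int) bv)
      = List.replicate i "O" ++ bv :: (List.replicate (k - 1) iv ++ List.replicate (n - i - k) "O") := by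
  have hinit : PySem.List.pySetD (List.replicate n "O") (i : Int) bv
      = (List.replicate i "O" ++ [bv]) ++ List.replicate (n - i - 1) "O" := by
    rw [PySem.List.pySetD_natCast, set_repl n i "O" bv (by omega)]
    simp
  have hshift : PySem.List.pyRange 1 (k : Int) 1
      = (PySem.List.pyRange ((i : Int) + 1) ((i : Int) + k) 1).map (fun x : Int => x - (i : Int)) := by
    rw [PySem.List.pyRange_one, PySem.List.pyRange_one, List.map_map]
    have : ((i : Int) + (k : Int)) - ((i : Int) + 1) = (k : Int) - 1 := by ring
    rw [this]
    apply List.map_congr_left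
    intro a _
    simp; ring
  rw [hinit, hshift, List.foldl_map]
  have hfun : (fun (t : List String) x => PySem.List.pySetD t ((i : Int) + (x - i)) iv)
      = fun t x => PySem.List.pySetD t x iv := by
    funext t x; congr 1; ring
  rw [hfun]
  have hlen : ((i : Int) + 1) = (((List.replicate i "O" ++ [bv]).length : Nat) : Int) := by simp
  have hbound : ((i : Int) + k) = (((List.replicate i "O" ++ [bv]).length : Int) + ((k - 1 : Nat) : Int)) := by
    simp; omega
  rw [hlen, hbound, consec iv (k - 1) (List.replicate i "O" ++ [bv]) (n - i - 1) (by omega)]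
  simp [Nat.sub_sub]
  omega

-- A's range loop from index i equals the enumerate-scan reference over the suffix at i
lemma bio_scan_eq (tokens : List String) (first : String) (restM : List String) (label : String) :
    ∀ d i : Nat, tokens.length ≤ i + d →
      bioLoopA tokens (first :: restM) (restM.length + 1) label
          (List.replicate tokens.length "O")
          (PySem.List.pyRange (i : Int) ((tokens.length : Int) - ((restM.length + 1 : Nat) : Int) + 1) 1)
        = refScan (restM.length + 1) first restM ("B-" ++ label) ("I-" ++ label)
            tokens.length (tokens.drop i) i := by
  intro d
  induction d with
  | zero =>
      intro i hi
      rw [List.drop_eq_nil_of_le (by omega), PySem.List.pyRange_one_eq_nil (by push_cast; omega)]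
      rfl
  | succ d ih =>
      intro i hi
      by_cases hn : tokens.length ≤ i
      · rw [List.drop_eq_nil_of_le hn, PySem.List.pyRange_one_eq_nil (by push_cast; omega)]
        rfl
      · push_neg at hn
        have hdrop : tokens.drop i = tokens[i] :: tokens.drop (i + 1) :=
          List.drop_eq_getElem_cons hn
        by_cases hik : i + (restM.length + 1) ≤ tokens.length
        · rw [PySem.List.pyRange_one_cons (by push_cast; omega)]
          have hslice : PySem.List.slice tokens (some (i : Int)) (some ((i : Int) + ((restM.length + 1 : Nat) : Int)))
              = (tokens.drop i).take (restM.length + 1) := by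
            exact_mod_cast PySem.List.slice_natCast_add tokens i (restM.length + 1)
          rw [hdrop] at hslice
          simp only [List.take_succ_cons] at hslice
          rw [bioLoopA, hslice, hdrop, refScan]
          simp only [Nat.add_sub_cancel]
          by_cases htest : tokens[i] = first ∧ (tokens.drop (i + 1)).take restM.length = restM
          · rw [if_pos (by rw [htest.1, htest.2]), if_pos htest]
            rw [bio_writeLoop_eq tokens.length i (restM.length + 1) ("B-" ++ label) ("I-" ++ label) (by omega) hik]
            simp [Nat.add_sub_cancel]
          · rw [if_neg (by simpa [List.cons_eq_cons] using htest), if_neg htest]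
            exact ih (i + 1) (by omega)
        · rw [PySem.List.pyRange_one_eq_nil (by push_cast; omega), hdrop, refScan]
          simp only [Nat.add_sub_cancel]
          have hlen : ((tokens.drop (i + 1)).take restM.length).length < restM.length := by
            simp [List.length_take, List.length_drop]
            omega
          rw [if_neg (by rintro ⟨-, h2⟩; rw [h2] at hlen; omega)]
          have := ih (i + 1) (by omega)
          rw [PySem.List.pyRange_one_eq_nil (by push_cast; omega)] at this
          exact this

-- ===== VERDICT (by name: the statement is the Claim_ definition above) =====
theorem bio_tag_spec : Claim_unchanged_bio_tag := by
  intro tokens mention label _ hpre hnd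
  unfold Pre_bio_tag at hpre
  unfold D_bio_tag at hnd
  show bio_tag tokens mention label = bio_tag_alt tokens mention label
  unfold bio_tag bio_tag_alt
  rcases hsplit : PySem.Str.split₀ mention with _ | ⟨first, restM⟩
  · rcases hpre with h | h
    · exact absurd ⟨h, hsplit⟩ hnd
    · exact absurd hsplit h
  · simp only [PySem.List.pyRepeat_singleton, Int.toNat_natCast, List.length_cons]
    have hA := bio_scan_eq tokens first restM label tokens.length 0 (by omega)
    simp only [Nat.cast_zero, List.drop_zero] at hA
    rw [hA]
    have hk : (first :: restM) ≠ [] := List.cons_ne_nil _ _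
    have hR := ref_correct tokens first restM ("B-" ++ label) ("I-" ++ label) tokens 0
      List.drop_zero (by intro i' hi'; omega)
    have hB := auto_correct tokens (first :: restM) ("B-" ++ label) ("I-" ++ label) hk
      tokens 0 0 List.drop_zero (by simp) (by simp)
      (by intro p hp hs
          simp only [List.take_zero, List.suffix_nil] at hs
          have := congrArg List.length hs
          simp only [List.length_take, List.length_nil] at this
          omega)
      (by intro i hi
          simp only [List.length_cons] at hi
          omega)
    simp only [List.length_cons] at hB
    rw [hR, ← hB]

theorem bio_tag_changed : Claim_changed_bio_tag := by unfold Claim_changed_bio_tag; decide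

theorem bio_tag_tight : Claim_exact_bio_tag := by
  intro tokens mention label _ _ hD
  obtain ⟨hne, hsplit⟩ := hD
  rcases tokens with _ | ⟨t, ts⟩
  · exact absurd rfl hne
  · simp only [bio_tag, bio_tag_alt, hsplit, List.length_nil, Nat.cast_zero, sub_zero,
      List.length_cons]
    rw [PySem.List.pyRange_one_cons (by push_cast; omega)]
    rw [bioLoopA]
    rw [if_pos (by rw [PySem.List.slice_zero_start]; norm_num [PySem.List.slice])]
    simp
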